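-- pv_equiv track=rewrite | github.com/Jjiggu/CodingTest | 재연/Programmers/Level2/42587_프로세스.py | solution
-- ===== SOURCE A (Python) =====
-- import math
--
-- def solution(progresses, speeds):
--     answer = []
--     process=[]
--     limit=math.ceil((100 - progresses[0]) / speeds[0])
--     done=0
--     # 반복문 한번만 쓰도록 수정한 코드
--     for i in range(len(progresses)):
--         left=math.ceil((100 - progresses[i]) / speeds[i])
--         done+=1
--         if i==0 or limit<left:
--             process.append(math.ceil((100 - progresses[i]) / speeds[i]))
--             if i!=0:
--                 answer.append(done-1)
--                 limit=math.ceil((100 - progresses[i]) / speeds[i])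
--                 done=1
--         else:
--             continue
--     if left:
--         answer.append(done)
--     #2중 반복문 쓰던 코드
-- #     while process:
-- #         done=1
-- #         limit=process.pop(0)
-- #         while process and process[0]<=limit:
-- #             process.pop(0)
-- #             done+=1
-- #         answer.append(done)
--
--     return answer
-- ===== SOURCE B (Python) =====
-- import math
--
-- def solution(progresses, speeds):
--     days = [math.ceil((100 - p) / s) for p, s in zip(progresses, speeds)]
--     answer = []
--     while days:
--         limit = days[0]
--         k = 1
--         while k < len(days) and days[k] <= limit:
--             k += 1
--         answer.append(k)
--         days = days[k:]
--     return answer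
-- ===== Notes on version B (the rewrite author's own statement) =====
-- stated objective: alternative
-- what changed: B precomputes the completion-day list once and groups it with an explicit leader scan that slices each release off the front of a queue, instead of A's single index loop that recomputes each ceiling three times and threads limit/done/left state; Pre_ excludes the inputs where A raises (empty progresses, speeds shorter than progresses, a zero speed).
-- intended difference: On inputs whose last process needs 0 days to finish (ceil((100-p)/s)=0 for the last pair), A's trailing `if left:` guard silently drops the whole final release from the answer while B reports it; B's value is intended since every process must be deployed. — e.g. on solution([100], [1]): A returns [], B returns [1]
import Mathlib
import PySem

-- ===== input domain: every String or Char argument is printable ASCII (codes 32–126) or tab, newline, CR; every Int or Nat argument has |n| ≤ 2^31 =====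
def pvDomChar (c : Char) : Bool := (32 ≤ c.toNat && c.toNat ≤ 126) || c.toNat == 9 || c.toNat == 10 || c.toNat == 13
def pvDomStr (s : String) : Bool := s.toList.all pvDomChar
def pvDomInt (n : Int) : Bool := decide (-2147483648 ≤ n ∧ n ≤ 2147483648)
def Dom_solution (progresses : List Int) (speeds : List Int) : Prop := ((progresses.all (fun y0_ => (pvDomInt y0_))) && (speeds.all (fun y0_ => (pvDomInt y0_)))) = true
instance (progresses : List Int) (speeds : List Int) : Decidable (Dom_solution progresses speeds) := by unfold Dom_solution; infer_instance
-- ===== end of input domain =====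

-- B replaces A's state-threading single loop (limit/done/left, each ceiling recomputed three
-- times) by "compute the day list once, then slice each release group off the front of a queue";
-- where the last day is 0 A silently drops the final release (D_ below), B reports it.

-- math.ceil((100-p)/s) ported as exact integer ceiling -((-a)//s): for |a| ≤ 2^31+100 < 2^53
-- the float quotient cannot round across an integer, so the float ceil equals this value on Dom.
def pyCeil (a b : Int) : Int := -(PySem.Int.floordiv (-a) b)

-- ===== PORT A =====
structure StA where
  answer : List Int
  process : List Int
  limit : Int
  done : Int
  left : Int
deriving Repr, DecidableEq

def stepA (c : Nat → Int) (st : StA) (i : Nat) : StA :=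
  let left := c i
  let done := st.done + 1
  if i = 0 ∨ st.limit < left then
    let process := st.process ++ [c i]
    if i ≠ 0 then
      { answer := st.answer ++ [done - 1], process := process, limit := c i, done := 1, left := left }
    else
      { st with process := process, done := done, left := left }
  else
    { st with done := done, left := left }

def solution (progresses : List Int) (speeds : List Int) : List Int :=
  -- c i = math.ceil((100 - progresses[i]) / speeds[i]); the getD 0 defaults only fire where
  -- Python raises (IndexError / ZeroDivisionError), which Pre_solution excludes
  let c : Nat → Int := fun i =>
    pyCeil (100 - (PySem.List.pyGet? progresses (i : Int)).getD 0)
           ((PySem.List.pyGet? speeds (i : Int)).getD 0)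
  let init : StA := { answer := [], process := [], limit := c 0, done := 0, left := 0 }
  let st := (List.range progresses.length).foldl (stepA c) init
  if st.left ≠ 0 then st.answer ++ [st.done] else st.answer

-- ===== PORT B =====
-- inner `while k < len(days) and days[k] <= limit: k += 1` (counts the followers past the leader)
def countLeB (limit : Int) : List Int → Nat
  | [] => 0
  | d :: ds => if d ≤ limit then countLeB limit ds + 1 else 0

-- outer `while days:` loop: append the group size k, continue on days[k:]
def groupB : List Int → List Int
  | [] => []
  | d :: ds => ((countLeB d ds + 1 : Nat) : Int) :: groupB (ds.drop (countLeB d ds))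
termination_by l => l.length
decreasing_by simp [List.length_drop]

def solution_alt (progresses : List Int) (speeds : List Int) : List Int :=
  groupB ((progresses.zip speeds).map (fun x => pyCeil (100 - x.1) x.2))

-- ===== PRECONDITION & SPEC =====
-- Pre_ excludes exactly the inputs where Python A raises: empty progresses / speeds shorter
-- than progresses (IndexError) and a zero speed at a used index (ZeroDivisionError).
def Pre_solution (progresses : List Int) (speeds : List Int) : Prop :=
  progresses ≠ [] ∧ progresses.length ≤ speeds.length ∧
    ∀ i, i < progresses.length → speeds.getD i 0 ≠ 0
instance (progresses : List Int) (speeds : List Int) : Decidable (Pre_solution progresses speeds) := by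
  unfold Pre_solution; infer_instance

def pvWitness_solution : List Int × List Int := ([93, 30, 55], [1, 30, 5])

-- On inputs whose LAST process already needs 0 days (ceil((100-p)/s) = 0 for the last pair),
-- A silently drops the entire final release from its answer while B reports it; B's value is
-- intended because every process must be deployed.
def D_solution (progresses : List Int) (speeds : List Int) : Prop :=
  progresses ≠ [] ∧
    pyCeil (100 - progresses.getLastD 0) (speeds.getD (progresses.length - 1) 0) = 0
instance (progresses : List Int) (speeds : List Int) : Decidable (D_solution progresses speeds) := by
  unfold D_solution; infer_instance

def Spec_solution (progresses : List Int) (speeds : List Int) (out : List Int) : Prop :=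
  ¬ D_solution progresses speeds → out = solution_alt progresses speeds
instance (progresses : List Int) (speeds : List Int) (out : List Int) : Decidable (Spec_solution progresses speeds out) := by
  unfold Spec_solution; infer_instance

def pvDiffWitness_solution : List Int × List Int := ([100], [1])
def pvDiffWitnessOut_solution : (List Int) × (List Int) := ([], [1])

-- ===== CLAIM (what is proved, stated in full; the proofs are below) =====
def Claim_unchanged_solution : Prop := ∀ (progresses : List Int) (speeds : List Int), Dom_solution progresses speeds → Pre_solution progresses speeds → Spec_solution progresses speeds (solution progresses speeds)
def Claim_changed_solution : Prop := Dom_solution (pvDiffWitness_solution.1) (pvDiffWitness_solution.2) ∧ Pre_solution (pvDiffWitness_solution.1) (pvDiffWitness_solution.2) ∧ D_solution (pvDiffWitness_solution.1) (pvDiffWitness_solution.2) ∧ solution (pvDiffWitness_solution.1) (pvDiffWitness_solution.2) = pvDiffWitnessOut_solution.1 ∧ solution_alt (pvDiffWitness_solution.1) (pvDiffWitness_solution.2) = pvDiffWitnessOut_solution.2 ∧ pvDiffWitnessOut_solution.1 ≠ pvDiffWitnessOut_solution.2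
def Claim_exact_solution : Prop := ∀ (progresses : List Int) (speeds : List Int), Dom_solution progresses speeds → Pre_solution progresses speeds → D_solution progresses speeds → solution progresses speeds ≠ solution_alt progresses speeds

-- ===== LEMMAS AND PROOFS =====
theorem groupB_nil : groupB [] = [] := by rw [groupB.eq_def]

theorem groupB_cons (d : Int) (ds : List Int) :
    groupB (d :: ds) = ((countLeB d ds + 1 : Nat) : Int) :: groupB (ds.drop (countLeB d ds)) := by
  rw [groupB.eq_def]

-- loopA is A's loop from the second iteration on, seen as a function of the day values only.
def loopA (limit done : Int) : List Int → List Int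
  | [] => [done]
  | d :: rest => if limit < d then done :: loopA d 1 rest else loopA limit (done + 1) rest

theorem loopA_ne_nil (limit done : Int) (rest : List Int) : loopA limit done rest ≠ [] := by
  induction rest generalizing limit done with
  | nil => simp [loopA]
  | cons d rest ih => simp only [loopA]; split <;> simp [ih]

theorem loopA_eq (rest : List Int) : ∀ limit done : Int,
    loopA limit done rest
      = ((countLeB limit rest : Int) + done) :: groupB (rest.drop (countLeB limit rest)) := by
  induction rest with
  | nil => intro limit done; simp [loopA, countLeB, groupB_nil]
  | cons d rest ih =>
    intro limit done
    by_cases h : limit < d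
    · have hc : countLeB limit (d :: rest) = 0 := by
        simp [countLeB, show ¬ d ≤ limit by omega]
      rw [hc]
      simp only [loopA, if_pos h, ih d 1, List.drop_zero, groupB_cons]
      norm_num
    · have hd : d ≤ limit := by omega
      have hc : countLeB limit (d :: rest) = countLeB limit rest + 1 := by
        simp [countLeB, hd]
      rw [hc]
      simp only [loopA, if_neg h, ih limit (done + 1), List.drop_succ_cons]
      congr 1
      push_cast
      ring

theorem loopA_groupB (d : Int) (rest : List Int) : loopA d 1 rest = groupB (d :: rest) := by
  rw [loopA_eq, groupB_cons]
  push_cast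
  ring_nf

theorem dropLast_getLastD (l : List Int) (h : l ≠ []) : l.dropLast ++ [l.getLastD 0] = l := by
  obtain ⟨x, xs, rfl⟩ := List.exists_cons_of_ne_nil h
  induction xs generalizing x with
  | nil => simp
  | cons y ys ih => simpa [List.getLastD_cons] using ih y

theorem fold_stepA (c : Nat → Int) (l : List Nat) : (∀ i ∈ l, i ≠ 0) → ∀ st : StA,
    (l.foldl (stepA c) st).answer = st.answer ++ (loopA st.limit st.done (l.map c)).dropLast
    ∧ (l.foldl (stepA c) st).done = (loopA st.limit st.done (l.map c)).getLastD 0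
    ∧ (l.foldl (stepA c) st).left = (l.map c).getLastD st.left := by
  induction l with
  | nil => intro _ st; simp [loopA]
  | cons i l ih =>
    intro hl st
    have hi : i ≠ 0 := hl i (by simp)
    have hl' : ∀ j ∈ l, j ≠ 0 := fun j hj => hl j (by simp [hj])
    by_cases h : st.limit < c i
    · have hstep : stepA c st i =
        { answer := st.answer ++ [st.done], process := st.process ++ [c i],
          limit := c i, done := 1, left := c i } := by
        simp [stepA, hi, h]
      have ihs := ih hl' (stepA c st i)
      rw [hstep] at ihs
      obtain ⟨h1, h2, h3⟩ := ihs
      simp only [List.foldl_cons, hstep] at *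
      obtain ⟨b, L, hBL⟩ := List.exists_cons_of_ne_nil (loopA_ne_nil (c i) 1 (l.map c))
      refine ⟨?_, ?_, ?_⟩
      · rw [h1]
        simp only [List.map_cons, loopA, if_pos h, hBL]
        simp
      · rw [h2]
        simp only [List.map_cons, loopA, if_pos h, hBL]
        simp
      · rw [h3, List.map_cons, List.getLastD_cons]
    · have hstep : stepA c st i = { st with done := st.done + 1, left := c i } := by
        simp [stepA, hi, h]
      have ihs := ih hl' (stepA c st i)
      rw [hstep] at ihs
      obtain ⟨h1, h2, h3⟩ := ihs
      simp only [List.foldl_cons, hstep] at *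
      refine ⟨?_, ?_, ?_⟩
      · rw [h1]; simp only [List.map_cons, loopA, if_neg h]
      · rw [h2]; simp only [List.map_cons, loopA, if_neg h]
      · rw [h3, List.map_cons, List.getLastD_cons]

-- the characterisation of A's port on inputs satisfying Pre_: B's grouping of the day list,
-- minus its last group when the last day is 0.
theorem solution_char (progresses speeds : List Int)
    (hpre : Pre_solution progresses speeds) :
    solution progresses speeds =
      (if ((progresses.zip speeds).map (fun x => pyCeil (100 - x.1) x.2)).getLastD 0 ≠ 0
       then groupB ((progresses.zip speeds).map (fun x => pyCeil (100 - x.1) x.2))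
       else (groupB ((progresses.zip speeds).map (fun x => pyCeil (100 - x.1) x.2))).dropLast) := by
  obtain ⟨hne, hlen, hnz⟩ := hpre
  set days := (progresses.zip speeds).map (fun x => pyCeil (100 - x.1) x.2) with hdays
  set c : Nat → Int := fun i =>
    pyCeil (100 - (PySem.List.pyGet? progresses (i : Int)).getD 0)
           ((PySem.List.pyGet? speeds (i : Int)).getD 0) with hc
  have hn : 0 < progresses.length := List.length_pos_iff.mpr hne
  have hdlen : days.length = progresses.length := by
    simp [hdays, List.length_zip]; omega
  have hci : ∀ i (h : i < progresses.length), c i = days[i]'(by omega) := by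
    intro i h
    have h2 : i < speeds.length := by omega
    simp [hc, hdays, PySem.List.pyGet?_natCast, List.getElem?_eq_getElem h,
      List.getElem?_eq_getElem h2, List.getElem_zip]
  obtain ⟨m, hm⟩ : ∃ m, progresses.length = m + 1 := ⟨progresses.length - 1, by omega⟩
  have hrange : List.range progresses.length = 0 :: (List.range m).map Nat.succ := by
    rw [hm, List.range_succ_eq_map]
  have hst1 : stepA c { answer := [], process := [], limit := c 0, done := 0, left := 0 } 0
      = { answer := [], process := [c 0], limit := c 0, done := 1, left := c 0 } := by
    simp [stepA]
  have htail : ((List.range m).map Nat.succ).map c = days.tail := by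
    apply List.ext_getElem
    · simp [List.length_tail, hdlen, hm]
    · intro j h1 h2
      have hj : j < m := by simpa using h1
      simp only [List.getElem_map, List.getElem_range, List.getElem_tail]
      exact hci (j + 1) (by omega)
  have hfold := fold_stepA c ((List.range m).map Nat.succ) (by simp)
    { answer := [], process := [c 0], limit := c 0, done := 1, left := c 0 }
  rw [htail] at hfold
  obtain ⟨h1, h2, h3⟩ := hfold
  have hdne : days ≠ [] := by
    intro h; rw [h] at hdlen; simp at hdlen; omega
  obtain ⟨d0, dtl, hD⟩ := List.exists_cons_of_ne_nil hdne
  have hc0 : c 0 = d0 := by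
    rw [hci 0 hn, List.getElem_of_eq hD]; simp
  have hL : loopA (c 0) 1 days.tail = groupB days := by
    rw [hD]; simp only [List.tail_cons, hc0, loopA_groupB]
  have hleft : days.tail.getLastD (c 0) = days.getLastD 0 := by
    rw [hD, hc0]
    cases dtl with
    | nil => simp
    | cons x xs =>
      simp only [List.tail_cons, List.getLastD_eq_getLast?, List.getLast?_cons_cons,
        List.getLast?_eq_some_getLast (l := x :: xs) (by simp), Option.getD_some]
  show (if ((List.range progresses.length).foldl (stepA c)
        { answer := [], process := [], limit := c 0, done := 0, left := 0 }).left ≠ 0 then _ else _) = _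
  rw [hrange, List.foldl_cons, hst1]
  rw [h3, hleft]
  by_cases hz : days.getLastD 0 ≠ 0
  · rw [if_pos hz, if_pos hz, h1, h2, hL]
    dsimp only
    rw [List.nil_append]
    exact dropLast_getLastD _ (hL ▸ loopA_ne_nil (c 0) 1 days.tail)
  · rw [if_neg hz, if_neg hz, h1, hL]
    dsimp only
    rw [List.nil_append]

-- under Pre_, the last entry of the day list is exactly the quantity D_ talks about
theorem days_getLastD (p s : List Int) (hne : p ≠ []) (hlen : p.length ≤ s.length) :
    ((p.zip s).map (fun x => pyCeil (100 - x.1) x.2)).getLastD 0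
      = pyCeil (100 - p.getLastD 0) (s.getD (p.length - 1) 0) := by
  have hn : 0 < p.length := List.length_pos_iff.mpr hne
  set days := (p.zip s).map (fun x => pyCeil (100 - x.1) x.2) with hdays
  have hdlen : days.length = p.length := by
    simp [hdays, List.length_zip]; omega
  have h1 : p.length - 1 < days.length := by omega
  have h2 : p.length - 1 < p.length := by omega
  have h3 : p.length - 1 < s.length := by omega
  have hdg : days.getLastD 0 = days[p.length - 1] := by
    rw [List.getLastD_eq_getLast?, List.getLast?_eq_getElem?,
      List.getElem?_eq_getElem (by omega), Option.getD_some]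
    congr 1
    omega
  have hpg : p.getLastD 0 = p[p.length - 1] := by
    rw [List.getLastD_eq_getLast?, List.getLast?_eq_getElem?,
      List.getElem?_eq_getElem h2, Option.getD_some]
  have hsg : s.getD (p.length - 1) 0 = s[p.length - 1] := by
    rw [List.getD_eq_getElem?_getD, List.getElem?_eq_getElem h3, Option.getD_some]
  rw [hdg, hpg, hsg]
  simp [hdays, List.getElem_zip]

theorem groupB_ne_nil (l : List Int) (h : l ≠ []) : groupB l ≠ [] := by
  obtain ⟨x, xs, rfl⟩ := List.exists_cons_of_ne_nil h
  rw [groupB_cons]; simp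

-- ===== VERDICT (by name: the statement is the Claim_ definition above) =====
theorem solution_spec : Claim_unchanged_solution := by
  intro progresses speeds _ hpre hD
  show solution progresses speeds = solution_alt progresses speeds
  rw [solution_char progresses speeds hpre]
  have hz : ((progresses.zip speeds).map (fun x => pyCeil (100 - x.1) x.2)).getLastD 0 ≠ 0 := by
    rw [days_getLastD progresses speeds hpre.1 hpre.2.1]
    intro h
    exact hD ⟨hpre.1, h⟩
  rw [if_pos hz]
  rfl

theorem alt_witness : solution_alt [100] [1] = [1] := by
  rw [show solution_alt [100] [1] = groupB [pyCeil 0 1] from rfl, groupB_cons]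
  norm_num [countLeB, groupB_nil, pyCeil, PySem.Int.floordiv]

theorem solution_changed : Claim_changed_solution := by
  unfold Claim_changed_solution
  exact ⟨by decide, by decide, by decide, by decide, alt_witness, by decide⟩

theorem solution_tight : Claim_exact_solution := by
  intro progresses speeds _ hpre hD
  rw [solution_char progresses speeds hpre]
  have hz : ((progresses.zip speeds).map (fun x => pyCeil (100 - x.1) x.2)).getLastD 0 = 0 := by
    rw [days_getLastD progresses speeds hpre.1 hpre.2.1]
    exact hD.2
  rw [if_neg (not_not.mpr hz)]
  intro heq
  have hdne : (progresses.zip speeds).map (fun x => pyCeil (100 - x.1) x.2) ≠ [] := by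
    have hn : 0 < progresses.length := List.length_pos_iff.mpr hpre.1
    have hls := hpre.2.1
    intro h
    have hlz := congrArg List.length h
    simp only [List.length_map, List.length_zip, List.length_nil] at hlz
    omega
  have hg := groupB_ne_nil _ hdne
  have hlq := congrArg List.length heq
  have hlen0 : 0 < (groupB ((progresses.zip speeds).map (fun x => pyCeil (100 - x.1) x.2))).length :=
    List.length_pos_iff.mpr hg
  rw [show solution_alt progresses speeds
      = groupB ((progresses.zip speeds).map (fun x => pyCeil (100 - x.1) x.2)) from rfl,
    List.length_dropLast] at hlq
  omega
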